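-- pv_equiv track=rewrite | github.com/helmdubo/SCAFFOLD | dev/tools/CFTUV/analysis_derived.py | _build_band_cap_path_groups
-- ===== SOURCE A (Python) =====
-- def _build_band_cap_path_groups(chain_count: int, side_pair: tuple[int, ...]) -> tuple[tuple[int, ...], ...]:
--     """Split a loop into two contiguous non-side paths between the selected SIDE chains."""
--
--     if chain_count < 4 or len(side_pair) != 2:
--         return ()
--     side_a_index, side_b_index = side_pair
--     if side_a_index == side_b_index:
--         return ()
--
--     forward_span = (side_b_index - side_a_index) % chain_count
--     backward_span = (side_a_index - side_b_index) % chain_count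
--     if forward_span <= 1 or backward_span <= 1:
--         return ()
--
--     forward_group = tuple(
--         (side_a_index + offset) % chain_count
--         for offset in range(1, forward_span)
--     )
--     backward_group = tuple(
--         (side_b_index + offset) % chain_count
--         for offset in range(1, backward_span)
--     )
--     if not forward_group or not backward_group:
--         return ()
--     return (forward_group, backward_group)
-- ===== SOURCE B (Python) =====
-- def _build_band_cap_path_groups(chain_count: int, side_pair: tuple[int, ...]) -> tuple[tuple[int, ...], ...]:
--     """Build the full rotated circular ordering once, then cut the two arcs out of it as slices."""
--     if chain_count < 4 or len(side_pair) != 2: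
--         return ()
--     side_a_index, side_b_index = side_pair[0], side_pair[1]
--     if side_a_index == side_b_index:
--         return ()
--     forward_span = (side_b_index - side_a_index) % chain_count
--     if forward_span <= 1 or chain_count - forward_span <= 1:
--         return ()
--     rotated = tuple((side_a_index + k) % chain_count for k in range(chain_count))
--     return (rotated[1:forward_span], rotated[forward_span + 1:])
-- ===== Notes on version B (the rewrite author's own statement) =====
-- stated objective: alternative
-- what changed: B builds the full rotated circular ordering once and cuts both arcs out of it as two slices, instead of generating each arc with its own modular comprehension and a separate backward-span modulus; the backward span becomes chain_count - forward_span.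
import Mathlib
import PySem

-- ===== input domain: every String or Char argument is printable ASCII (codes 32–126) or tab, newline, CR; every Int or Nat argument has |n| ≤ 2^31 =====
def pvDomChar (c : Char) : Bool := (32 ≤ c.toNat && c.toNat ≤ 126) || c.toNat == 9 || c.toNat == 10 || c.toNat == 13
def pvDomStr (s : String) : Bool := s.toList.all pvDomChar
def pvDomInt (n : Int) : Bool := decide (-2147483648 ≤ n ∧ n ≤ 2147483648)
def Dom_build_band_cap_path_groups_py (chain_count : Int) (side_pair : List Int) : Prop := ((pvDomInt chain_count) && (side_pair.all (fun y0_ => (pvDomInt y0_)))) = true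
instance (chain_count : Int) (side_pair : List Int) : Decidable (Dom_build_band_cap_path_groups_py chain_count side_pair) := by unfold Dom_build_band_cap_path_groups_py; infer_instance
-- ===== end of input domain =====

-- B builds the rotated circular ordering once and cuts both arcs out of it as slices (alternative decomposition, same cost).
-- ===== PORT A =====
def build_band_cap_path_groups_py (chain_count : Int) (side_pair : List Int) : List (List Int) :=
  if chain_count < 4 ∨ side_pair.length ≠ 2 then []
  else
    match side_pair with
    | [side_a_index, side_b_index] =>
      if side_a_index = side_b_index then []
      else
        let forward_span := PySem.Int.mod (side_b_index - side_a_index) chain_count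
        let backward_span := PySem.Int.mod (side_a_index - side_b_index) chain_count
        if forward_span ≤ 1 ∨ backward_span ≤ 1 then []
        else
          let forward_group := (PySem.List.pyRange 1 forward_span 1).map
            (fun offset => PySem.Int.mod (side_a_index + offset) chain_count)
          let backward_group := (PySem.List.pyRange 1 backward_span 1).map
            (fun offset => PySem.Int.mod (side_b_index + offset) chain_count)
          if forward_group = [] ∨ backward_group = [] then []
          else [forward_group, backward_group]
    | _ => []

-- ===== PORT B =====
def build_band_cap_path_groups_py_alt (chain_count : Int) (side_pair : List Int) : List (List Int) :=
  if chain_count < 4 ∨ side_pair.length ≠ 2 then []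
  else
    -- tuple unpacking of the length-2 list, read as its two elements (exact under the length guard)
    let side_a_index := PySem.List.pyGetD side_pair 0 0
    let side_b_index := PySem.List.pyGetD side_pair 1 0
    if side_a_index = side_b_index then []
    else
      let forward_span := PySem.Int.mod (side_b_index - side_a_index) chain_count
      if forward_span ≤ 1 ∨ chain_count - forward_span ≤ 1 then []
      else
        let rotated := (PySem.List.pyRange 0 chain_count 1).map
          (fun k => PySem.Int.mod (side_a_index + k) chain_count)
        [PySem.List.slice rotated (some 1) (some forward_span),
         PySem.List.slice rotated (some (forward_span + 1)) none]

-- ===== PRECONDITION & SPEC =====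
def Spec_build_band_cap_path_groups_py (chain_count : Int) (side_pair : List Int) (out : List (List Int)) : Prop := out = build_band_cap_path_groups_py_alt chain_count side_pair
instance (chain_count : Int) (side_pair : List Int) (out : List (List Int)) : Decidable (Spec_build_band_cap_path_groups_py chain_count side_pair out) := by unfold Spec_build_band_cap_path_groups_py; infer_instance

-- ===== CLAIM (what is proved, stated in full; the proofs are below) =====
def Claim_equal_build_band_cap_path_groups_py : Prop := ∀ (chain_count : Int) (side_pair : List Int), Dom_build_band_cap_path_groups_py chain_count side_pair → Spec_build_band_cap_path_groups_py chain_count side_pair (build_band_cap_path_groups_py chain_count side_pair)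

-- ===== LEMMAS AND PROOFS =====
theorem band_inner (n a b fs bs : Int) (hn4 : 4 ≤ n)
    (hfse : fs = PySem.Int.mod (b - a) n) (hbse : bs = PySem.Int.mod (a - b) n) :
    (if fs ≤ 1 ∨ bs ≤ 1 then ([] : List (List Int))
     else
       if (PySem.List.pyRange 1 fs 1).map (fun offset => PySem.Int.mod (a + offset) n) = [] ∨
          (PySem.List.pyRange 1 bs 1).map (fun offset => PySem.Int.mod (b + offset) n) = [] then []
       else [(PySem.List.pyRange 1 fs 1).map (fun offset => PySem.Int.mod (a + offset) n),
             (PySem.List.pyRange 1 bs 1).map (fun offset => PySem.Int.mod (b + offset) n)])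
    = (if fs ≤ 1 ∨ n - fs ≤ 1 then ([] : List (List Int))
       else
         [PySem.List.slice ((PySem.List.pyRange 0 n 1).map (fun k => PySem.Int.mod (a + k) n)) (some 1) (some fs),
          PySem.List.slice ((PySem.List.pyRange 0 n 1).map (fun k => PySem.Int.mod (a + k) n)) (some (fs + 1)) none]) := by
  have hnpos : (0:Int) < n := by omega
  have hfse' : fs = (b - a) % n := by rw [hfse]; exact PySem.Int.mod_eq_emod_of_pos hnpos
  have hbse' : bs = (a - b) % n := by rw [hbse]; exact PySem.Int.mod_eq_emod_of_pos hnpos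
  have hfs0 : 0 ≤ fs := by rw [hfse']; exact Int.emod_nonneg _ (by omega)
  have hfslt : fs < n := by rw [hfse']; exact Int.emod_lt_of_pos _ hnpos
  by_cases h1 : fs ≤ 1
  · rw [if_pos (Or.inl h1), if_pos (Or.inl h1)]
  · have hfs2 : 2 ≤ fs := by omega
    have hfd : fs = (b - a) - n * ((b - a) / n) := by rw [hfse', Int.emod_def]
    have hbseq : bs = n - fs := by
      have key : ((a - b) - (n - fs)) % n = 0 := by
        have heq : (a - b) - (n - fs) = n * (-(1 + (b - a) / n)) := by rw [hfd]; ring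
        rw [heq]; exact Int.mul_emod_right _ _
      have h2 : (a - b) % n = (n - fs) % n := Int.emod_eq_emod_iff_emod_sub_eq_zero.mpr key
      rw [hbse', h2, Int.emod_eq_of_lt (by omega) (by omega)]
    by_cases h2 : n - fs ≤ 1
    · rw [if_pos (Or.inr (by omega : bs ≤ 1)), if_pos (Or.inr h2)]
    · have hfgne : (PySem.List.pyRange 1 fs 1).map (fun offset => PySem.Int.mod (a + offset) n) ≠ [] := by
        apply List.ne_nil_of_length_pos
        simp only [List.length_map, PySem.List.length_pyRange_one]
        omega
      have hbgne : (PySem.List.pyRange 1 bs 1).map (fun offset => PySem.Int.mod (b + offset) n) ≠ [] := by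
        apply List.ne_nil_of_length_pos
        simp only [List.length_map, PySem.List.length_pyRange_one]
        omega
      have hgA : ¬(fs ≤ 1 ∨ bs ≤ 1) := by push Not; exact ⟨by omega, by omega⟩
      have hgB : ¬(fs ≤ 1 ∨ n - fs ≤ 1) := by push Not; exact ⟨by omega, by omega⟩
      have hgI : ¬((PySem.List.pyRange 1 fs 1).map (fun offset => PySem.Int.mod (a + offset) n) = [] ∨
          (PySem.List.pyRange 1 bs 1).map (fun offset => PySem.Int.mod (b + offset) n) = []) := by
        push Not; exact ⟨hfgne, hbgne⟩
      rw [if_neg hgA, if_neg hgI, if_neg hgB]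
      have hsplit : PySem.List.pyRange 0 n 1
          = PySem.List.pyRange 0 1 1 ++ (PySem.List.pyRange 1 fs 1 ++ PySem.List.pyRange fs n 1) := by
        rw [← PySem.List.pyRange_one_append 1 fs n (by omega) (by omega),
            ← PySem.List.pyRange_one_append 0 1 n (by omega) (by omega)]
      have hsplit2 : PySem.List.pyRange 0 n 1
          = PySem.List.pyRange 0 (fs + 1) 1 ++ PySem.List.pyRange (fs + 1) n 1 :=
        PySem.List.pyRange_one_append 0 (fs + 1) n (by omega) (by omega)
      congr 1
      -- forward group = rotated[1:fs]
      · rw [PySem.List.slice_toNat _ (show (0:Int) ≤ 1 by norm_num) hfs0, hsplit]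
        simp only [List.map_append]
        rw [List.drop_left' (by simp only [List.length_map, PySem.List.length_pyRange_one]; omega),
            List.take_left' (by simp only [List.length_map, PySem.List.length_pyRange_one]; omega)]
      -- backward group = rotated[fs+1:]
      · congr 1
        rw [PySem.List.slice_from _ (show (0:Int) ≤ fs + 1 by omega), hsplit2]
        simp only [List.map_append]
        rw [List.drop_left' (by simp only [List.length_map, PySem.List.length_pyRange_one]; omega)]
        rw [hbseq, PySem.List.pyRange_one 1 (n - fs), PySem.List.pyRange_one (fs + 1) n,
            List.map_map, List.map_map]
        have hlen2 : (n - fs - 1).toNat = (n - (fs + 1)).toNat := by omega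
        rw [hlen2]
        apply List.map_congr_left
        intro k hk
        simp only [Function.comp]
        rw [PySem.Int.mod_eq_emod_of_pos hnpos, PySem.Int.mod_eq_emod_of_pos hnpos]
        apply Int.emod_eq_emod_iff_emod_sub_eq_zero.mpr
        have heq : (b + (1 + (k:Int))) - (a + (fs + 1 + (k:Int))) = n * ((b - a) / n) := by
          rw [hfd]; ring
        rw [heq]; exact Int.mul_emod_right _ _

theorem main_eq (chain_count : Int) (side_pair : List Int) :
    build_band_cap_path_groups_py chain_count side_pair = build_band_cap_path_groups_py_alt chain_count side_pair := by
  unfold build_band_cap_path_groups_py build_band_cap_path_groups_py_alt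
  by_cases h0 : chain_count < 4 ∨ side_pair.length ≠ 2
  · rw [if_pos h0, if_pos h0]
  · rw [if_neg h0, if_neg h0]
    push Not at h0
    obtain ⟨hn4, hlen⟩ := h0
    obtain ⟨a, b, rfl⟩ := List.length_eq_two.mp hlen
    by_cases hab : a = b
    · subst hab
      simp [PySem.List.pyGetD_ofNat', List.getD]
    · dsimp only
      simp only [PySem.List.pyGetD_ofNat', List.getD]
      simp only [List.getElem?_cons_zero, List.getElem?_cons_succ, Option.getD_some]
      rw [if_neg hab, if_neg hab]
      exact band_inner chain_count a b _ _ (by omega) rfl rfl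

-- ===== VERDICT (by name: the statement is the Claim_ definition above) =====
theorem build_band_cap_path_groups_py_spec : Claim_equal_build_band_cap_path_groups_py := by
  intro n sp _
  exact main_eq n sp
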